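-- pv_equiv track=rewrite | github.com/CRadley/aoc-2023 | d11.py | determine_expanded_star_positions
-- ===== SOURCE A (Python) =====
-- def determine_expanded_star_positions(galaxy, rows_to_expand, cols_to_expand, scale=1):
--     stars = []
--     expansion_scale = scale - 1
--     for x, r in enumerate(galaxy):
--         for y, c in enumerate(r):
--             if c == "#":
--                 x_expansion = sum(x > r for r in rows_to_expand) * expansion_scale
--                 y_expansion = sum(y > c for c in cols_to_expand) * expansion_scale
--                 stars.append((x + x_expansion, y + y_expansion))
--     return stars
-- ===== SOURCE B (Python) =====
-- def determine_expanded_star_positions(galaxy, rows_to_expand, cols_to_expand, scale=1):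
--     e = scale - 1
--
--     def offsets(values, n):
--         # offsets[x] = (#values below x) * e for x in range(n), built by bucket counting
--         below = 0
--         cnt = {}
--         for v in values:
--             if v < 0:
--                 below += 1
--             elif v < n:
--                 cnt[v] = cnt.get(v, 0) + 1
--         out = []
--         run = below
--         for x in range(n):
--             out.append(run * e)
--             run += cnt.get(x, 0)
--         return out
--
--     width = 0
--     for row in galaxy:
--         if len(row) > width:
--             width = len(row)
--     row_off = offsets(rows_to_expand, len(galaxy))
--     col_off = offsets(cols_to_expand, width)
--     stars = []
--     for x, row in enumerate(galaxy):
--         for y, ch in enumerate(row):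
--             if ch == "#":
--                 stars.append((x + row_off[x], y + col_off[y]))
--     return stars
-- ===== Notes on version B (the rewrite author's own statement) =====
-- stated objective: alternative
-- what changed: B precomputes per-row and per-column expansion-offset tables once by bucket counting (negatives counted into a base, in-range values into a dict, then a prefix sweep) and does an O(1) table lookup per star, instead of re-scanning rows_to_expand and cols_to_expand for every star as A does.
import Mathlib
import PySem

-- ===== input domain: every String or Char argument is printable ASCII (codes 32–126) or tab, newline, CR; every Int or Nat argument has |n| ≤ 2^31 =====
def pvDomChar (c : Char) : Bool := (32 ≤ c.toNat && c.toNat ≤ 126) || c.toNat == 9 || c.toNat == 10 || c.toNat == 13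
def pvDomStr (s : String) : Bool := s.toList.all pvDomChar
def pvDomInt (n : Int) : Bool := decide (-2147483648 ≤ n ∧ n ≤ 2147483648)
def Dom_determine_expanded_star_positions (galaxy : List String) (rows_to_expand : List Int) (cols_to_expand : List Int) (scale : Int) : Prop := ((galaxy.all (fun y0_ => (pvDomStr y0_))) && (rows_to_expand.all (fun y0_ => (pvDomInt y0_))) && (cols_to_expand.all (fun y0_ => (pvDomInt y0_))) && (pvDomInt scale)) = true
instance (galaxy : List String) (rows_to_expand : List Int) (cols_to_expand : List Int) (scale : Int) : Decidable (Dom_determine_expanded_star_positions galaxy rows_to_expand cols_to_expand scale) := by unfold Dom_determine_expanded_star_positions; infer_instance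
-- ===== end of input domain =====

-- B precomputes per-row/per-column expansion-offset tables once by bucket counting and looks them up per star, instead of A's per-star rescans of rows_to_expand/cols_to_expand.


-- ===== PORT A =====
def determine_expanded_star_positions (galaxy : List String) (rows_to_expand : List Int) (cols_to_expand : List Int) (scale : Int) : List (Int × Int) :=
  let expansion_scale := scale - 1
  (PySem.List.enumerate galaxy).foldl (fun stars xr =>
    (PySem.List.enumerate xr.2.toList).foldl (fun stars yc =>
      if yc.2 = '#' then
        let x_expansion := (rows_to_expand.foldl (fun acc r => acc + (if xr.1 > r then (1 : Int) else 0)) 0) * expansion_scale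
        let y_expansion := (cols_to_expand.foldl (fun acc c => acc + (if yc.1 > c then (1 : Int) else 0)) 0) * expansion_scale
        stars ++ [(xr.1 + x_expansion, yc.1 + y_expansion)]
      else stars) stars) []

-- ===== PORT B =====
-- Source B's inner helper 'offsets(values, n)': offsets[x] = (#values below x) * e, built by bucket counting.
def pvOffsets (values : List Int) (n : Int) (e : Int) : List Int :=
  let bc := values.foldl (fun (bc : Int × PySem.Dict Int Int) v =>
      if v < 0 then (bc.1 + 1, bc.2)
      else if v < n then (bc.1, bc.2.insert v (bc.2.getD v 0 + 1))
      else bc) (0, PySem.Dict.empty)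
  ((PySem.List.pyRange 0 n).foldl (fun (out_run : List Int × Int) x =>
      (out_run.1 ++ [out_run.2 * e], out_run.2 + bc.2.getD x 0)) ([], bc.1)).1

-- The pyGetD lookups are always in range: x < len(galaxy) and y < width by construction.
def determine_expanded_star_positions_alt (galaxy : List String) (rows_to_expand : List Int) (cols_to_expand : List Int) (scale : Int) : List (Int × Int) :=
  let e := scale - 1
  let width := galaxy.foldl (fun w row => if PySem.Str.len row > w then PySem.Str.len row else w) 0
  let row_off := pvOffsets rows_to_expand (PySem.List.len galaxy) e
  let col_off := pvOffsets cols_to_expand width e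
  (PySem.List.enumerate galaxy).foldl (fun stars xrow =>
    (PySem.List.enumerate xrow.2.toList).foldl (fun stars yc =>
      if yc.2 = '#' then
        stars ++ [(xrow.1 + PySem.List.pyGetD row_off xrow.1 0, yc.1 + PySem.List.pyGetD col_off yc.1 0)]
      else stars) stars) []

-- ===== PRECONDITION & SPEC =====
def Spec_determine_expanded_star_positions (galaxy : List String) (rows_to_expand : List Int) (cols_to_expand : List Int) (scale : Int) (out : List (Int × Int)) : Prop := out = determine_expanded_star_positions_alt galaxy rows_to_expand cols_to_expand scale
instance (galaxy : List String) (rows_to_expand : List Int) (cols_to_expand : List Int) (scale : Int) (out : List (Int × Int)) : Decidable (Spec_determine_expanded_star_positions galaxy rows_to_expand cols_to_expand scale out) := by unfold Spec_determine_expanded_star_positions; infer_instance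

-- ===== CLAIM (what is proved, stated in full; the proofs are below) =====
def Claim_equal_determine_expanded_star_positions : Prop := ∀ (galaxy : List String) (rows_to_expand : List Int) (cols_to_expand : List Int) (scale : Int), Dom_determine_expanded_star_positions galaxy rows_to_expand cols_to_expand scale → Spec_determine_expanded_star_positions galaxy rows_to_expand cols_to_expand scale (determine_expanded_star_positions galaxy rows_to_expand cols_to_expand scale)

-- ===== LEMMAS AND PROOFS =====

-- A's per-star sum over a list of 'x > r' booleans is the count of elements below x.
theorem pv_sum_gt_eq_countP (l : List Int) (x a : Int) :
    l.foldl (fun acc r => acc + (if x > r then (1 : Int) else 0)) a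
      = a + (l.countP (fun r => decide (r < x)) : Int) := by
  induction l generalizing a with
  | nil => simp
  | cons h t ih =>
    simp only [List.foldl_cons, List.countP_cons, ih]
    by_cases hx : h < x
    · simp only [hx, if_pos, decide_true]
      push_cast; ring
    · simp only [hx, decide_false, if_neg, not_false_iff]
      push_cast; ring

-- B's width fold only grows its accumulator …
theorem pv_width_fold_le (galaxy : List String) (w : Int) :
    w ≤ galaxy.foldl (fun w row => if PySem.Str.len row > w then PySem.Str.len row else w) w := by
  induction galaxy generalizing w with
  | nil => simp
  | cons r t ih =>
    simp only [List.foldl_cons]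
    split_ifs with h
    · exact le_trans (le_of_lt h) (ih _)
    · exact ih _

-- … and dominates the length of every row.
theorem pv_len_le_width (galaxy : List String) (w : Int) (r : String) (hr : r ∈ galaxy) :
    PySem.Str.len r ≤ galaxy.foldl (fun w row => if PySem.Str.len row > w then PySem.Str.len row else w) w := by
  induction galaxy generalizing w with
  | nil => cases hr
  | cons s t ih =>
    simp only [List.foldl_cons]
    rcases List.mem_cons.mp hr with h | h
    · subst h
      split_ifs with hs
      · exact pv_width_fold_le t _
      · exact le_trans (le_of_not_gt hs) (pv_width_fold_le t _)
    · exact ih _ h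

-- The first component of B's bucket fold counts the negative values.
theorem pv_bucket_base (values : List Int) (n b : Int) (d : PySem.Dict Int Int) :
    (values.foldl (fun (bc : Int × PySem.Dict Int Int) v =>
        if v < 0 then (bc.1 + 1, bc.2)
        else if v < n then (bc.1, bc.2.insert v (bc.2.getD v 0 + 1))
        else bc) (b, d)).1
      = b + (values.countP (fun v => decide (v < 0)) : Int) := by
  induction values generalizing b d with
  | nil => simp
  | cons v t ih =>
    simp only [List.foldl_cons, List.countP_cons]
    by_cases hv : v < 0
    · rw [if_pos hv, ih]
      simp only [hv, decide_true, if_true]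
      push_cast; ring
    · have hd : (decide (v < 0)) = false := by simp [hv]
      rw [if_neg hv, hd]
      split_ifs with h2 <;> rw [ih] <;> simp_all

-- The dictionary of B's bucket fold counts each in-range value exactly.
theorem pv_bucket_cnt (values : List Int) (n b : Int) (d : PySem.Dict Int Int)
    (x : Int) (hx0 : 0 ≤ x) (hxn : x < n) :
    ((values.foldl (fun (bc : Int × PySem.Dict Int Int) v =>
        if v < 0 then (bc.1 + 1, bc.2)
        else if v < n then (bc.1, bc.2.insert v (bc.2.getD v 0 + 1))
        else bc) (b, d)).2).getD x 0
      = d.getD x 0 + (values.count x : Int) := by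
  induction values generalizing b d with
  | nil => simp
  | cons v t ih =>
    simp only [List.foldl_cons, List.count_cons]
    by_cases hv : v < 0
    · have hvx : (v == x) = false := by simp only [beq_eq_false_iff_ne]; omega
      rw [if_pos hv, ih, hvx]
      simp
    · by_cases hvn : v < n
      · rw [if_neg hv, if_pos hvn, ih, PySem.Dict.getD_insert]
        by_cases hxv : x = v
        · subst hxv
          rw [if_pos rfl]
          simp only [beq_self_eq_true, if_true]
          push_cast; ring
        · have hvx : (v == x) = false := by
            simp only [beq_eq_false_iff_ne]; exact fun h => hxv h.symm
          rw [if_neg hxv, hvx]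
          simp
      · have hvx : (v == x) = false := by simp only [beq_eq_false_iff_ne]; omega
        rw [if_neg hv, if_neg hvn, ih, hvx]
        simp

-- Counting values below x + 1 = counting values below x plus the values equal to x.
theorem pv_countP_succ (values : List Int) (x : Int) :
    (values.countP (fun v => decide (v < x + 1)) : Int)
      = (values.countP (fun v => decide (v < x)) : Int) + (values.count x : Int) := by
  induction values with
  | nil => simp
  | cons v t ih =>
    simp only [List.countP_cons, List.count_cons, beq_iff_eq]
    by_cases h1 : v < x + 1 <;> by_cases h2 : v < x <;> by_cases h3 : v = x <;>
      simp_all <;> omega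

-- B's sweep over range(n): the emitted list is the running count times e at each index.
theorem pv_sweep (e : Int) (g : Nat → Int) (f : Nat → Int) (m : Nat) (acc : List Int) (b0 : Int)
    (hb0 : b0 = f 0)
    (hstep : ∀ k : Nat, k < m → f (k + 1) = f k + g k) :
    (List.range m).foldl
        (fun (out_run : List Int × Int) k => (out_run.1 ++ [out_run.2 * e], out_run.2 + g k))
        (acc, b0)
      = (acc ++ (List.range m).map (fun k => f k * e), f m) := by
  subst hb0
  induction m with
  | zero => simp
  | succ m ih =>
    rw [List.range_succ, List.foldl_append, ih (fun k hk => hstep k (Nat.lt_succ_of_lt hk))]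
    rw [List.map_append]
    simp only [List.foldl_cons, List.foldl_nil, List.map_cons, List.map_nil, List.append_assoc]
    rw [hstep m (Nat.lt_succ_self m)]

-- B's offsets table is the table of below-counts scaled by e.
theorem pv_offsets_eq (values : List Int) (n e : Int) :
    pvOffsets values n e
      = (PySem.List.pyRange 0 n).map
          (fun x => (values.countP (fun v => decide (v < x)) : Int) * e) := by
  by_cases hn : 0 ≤ n
  · obtain ⟨m, rfl⟩ : ∃ m : Nat, n = (m : Int) := ⟨n.toNat, (Int.toNat_of_nonneg hn).symm⟩
    simp only [pvOffsets]
    rw [PySem.List.pyRange_zero_natCast, List.foldl_map]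
    rw [pv_sweep e
      (fun k => ((values.foldl (fun (bc : Int × PySem.Dict Int Int) v =>
          if v < 0 then (bc.1 + 1, bc.2)
          else if v < (m : Int) then (bc.1, bc.2.insert v (bc.2.getD v 0 + 1))
          else bc) (0, PySem.Dict.empty)).2).getD (k : Int) 0)
      (fun k => (values.countP (fun v => decide (v < (k : Int))) : Int)) m [] _
      (by rw [pv_bucket_base]; simp)
      (by
        intro k hk
        simp only
        rw [pv_bucket_cnt values (m : Int) 0 PySem.Dict.empty (k : Int)
          (by positivity) (by exact_mod_cast hk)]
        rw [PySem.Dict.getD_empty]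
        have h := pv_countP_succ values (k : Int)
        push_cast
        push_cast at h
        omega)]
    rw [List.nil_append, List.map_map]
    rfl
  · have hnil : PySem.List.pyRange 0 n = [] := PySem.List.pyRange_one_eq_nil (by omega)
    simp only [pvOffsets]
    rw [hnil]
    simp

-- ===== VERDICT (by name: the statement is the Claim_ definition above) =====
theorem determine_expanded_star_positions_spec : Claim_equal_determine_expanded_star_positions := by
  intro galaxy rows cols scale _dom
  unfold Spec_determine_expanded_star_positions
  unfold determine_expanded_star_positions determine_expanded_star_positions_alt
  simp only [pv_offsets_eq]
  apply PySem.List.foldl_congr_mem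
  intro acc xr hxr
  rcases (PySem.List.mem_enumerate_iff galaxy 0 xr).mp hxr with ⟨k, hk, hxe⟩
  subst hxe
  apply PySem.List.foldl_congr_mem
  intro acc2 yc hyc
  rcases (PySem.List.mem_enumerate_iff _ 0 yc).mp hyc with ⟨j, hj, hye⟩
  subst hye
  simp only [zero_add]
  split_ifs with hc
  · have hrow := PySem.List.pyGetD_map_pyRange_of_nonneg
      (fun x => ((rows.countP (fun r => decide (r < x)) : Int)) * (scale - 1))
      (PySem.List.len galaxy) (k : Int) 0 (by positivity)
      (by rw [PySem.List.len_eq]; exact_mod_cast hk)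
    have hwidth : ((j : Int)) < galaxy.foldl (fun w row => if PySem.Str.len row > w then PySem.Str.len row else w) 0 := by
      have hmem : galaxy[k] ∈ galaxy := List.getElem_mem hk
      have hle := pv_len_le_width galaxy 0 _ hmem
      have hj' : (j : Int) < PySem.Str.len galaxy[k] := by
        rw [PySem.Str.len_eq]; exact_mod_cast hj
      omega
    have hcol := PySem.List.pyGetD_map_pyRange_of_nonneg
      (fun y => ((cols.countP (fun c => decide (c < y)) : Int)) * (scale - 1))
      (galaxy.foldl (fun w row => if PySem.Str.len row > w then PySem.Str.len row else w) 0)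
      (j : Int) 0 (by positivity) hwidth
    rw [hrow, hcol, pv_sum_gt_eq_countP, pv_sum_gt_eq_countP]
    simp
  · rfl
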